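-- pv_equiv track=rewrite | github.com/PoweredByAdrian/MyProjects | Python/MyRaidBot/Raid.py | calculate_total_potions
-- ===== SOURCE A (Python) =====
-- potion_costs = {
--     "U": {
--         1: {"affinity": {"lesser": 2, "greater": 0, "superior": 0}, "arcane": {"lesser": 2, "greater": 0, "superior": 0}},
--         2: {"affinity": {"lesser": 2, "greater": 0, "superior": 0}, "arcane": {"lesser": 2, "greater": 0, "superior": 0}},
--         3: {"affinity": {"lesser": 3, "greater": 0, "superior": 0}, "arcane": {"lesser": 2, "greater": 0, "superior": 0}},
--         4: {"affinity": {"lesser": 3, "greater": 0, "superior": 0}, "arcane": {"lesser": 3, "greater": 0, "superior": 0}},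
--         5: {"affinity": {"lesser": 5, "greater": 0, "superior": 0}, "arcane": {"lesser": 3, "greater": 0, "superior": 0}},
--         6: {"affinity": {"lesser": 5, "greater": 0, "superior": 0}, "arcane": {"lesser": 3, "greater": 0, "superior": 0}}
--     },
--     "R": {
--         1: {"affinity": {"lesser": 4, "greater": 0, "superior": 0}, "arcane": {"lesser": 2, "greater": 0, "superior": 0}},
--         2: {"affinity": {"lesser": 6, "greater": 0, "superior": 0}, "arcane": {"lesser": 3, "greater": 0, "superior": 0}},
--         3: {"affinity": {"lesser": 0, "greater": 2, "superior": 0}, "arcane": {"lesser": 0, "greater": 1, "superior": 0}},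
--         4: {"affinity": {"lesser": 0, "greater": 2, "superior": 0}, "arcane": {"lesser": 0, "greater": 2, "superior": 0}},
--         5: {"affinity": {"lesser": 0, "greater": 5, "superior": 0}, "arcane": {"lesser": 0, "greater": 3, "superior": 0}},
--         6: {"affinity": {"lesser": 0, "greater": 6, "superior": 0}, "arcane": {"lesser": 0, "greater": 4, "superior": 0}}
--     },
--     "E": {
--         1: {"affinity": {"lesser": 0, "greater": 4, "superior": 0}, "arcane": {"lesser": 0, "greater": 3, "superior": 0}},
--         2: {"affinity": {"lesser": 0, "greater": 7, "superior": 0}, "arcane": {"lesser": 0, "greater": 5, "superior": 0}},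
--         3: {"affinity": {"lesser": 0, "greater": 9, "superior": 0}, "arcane": {"lesser": 0, "greater": 7, "superior": 0}},
--         4: {"affinity": {"lesser": 0, "greater": 0, "superior": 3}, "arcane": {"lesser": 0, "greater": 0, "superior": 1}},
--         5: {"affinity": {"lesser": 0, "greater": 0, "superior": 3}, "arcane": {"lesser": 0, "greater": 0, "superior": 2}},
--         6: {"affinity": {"lesser": 0, "greater": 0, "superior": 4}, "arcane": {"lesser": 0, "greater": 0, "superior": 2}}
--     },
--     "L": {
--         1: {"affinity": {"lesser": 0, "greater": 0, "superior": 1}, "arcane": {"lesser": 0, "greater": 5, "superior": 0}},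
--         2: {"affinity": {"lesser": 0, "greater": 0, "superior": 2}, "arcane": {"lesser": 0, "greater": 0, "superior": 2}},
--         3: {"affinity": {"lesser": 0, "greater": 0, "superior": 3}, "arcane": {"lesser": 0, "greater": 0, "superior": 2}},
--         4: {"affinity": {"lesser": 0, "greater": 0, "superior": 4}, "arcane": {"lesser": 0, "greater": 0, "superior": 3}},
--         5: {"affinity": {"lesser": 0, "greater": 0, "superior": 5}, "arcane": {"lesser": 0, "greater": 0, "superior": 4}},
--         6: {"affinity": {"lesser": 0, "greater": 0, "superior": 6}, "arcane": {"lesser": 0, "greater": 0, "superior": 5}}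
--     },
--     "M": {
--         1: {"affinity": {"lesser": 0, "greater": 0, "superior": 3}, "arcane": {"lesser": 0, "greater": 0, "superior": 2}},
--         2: {"affinity": {"lesser": 0, "greater": 0, "superior": 4}, "arcane": {"lesser": 0, "greater": 0, "superior": 3}},
--         3: {"affinity": {"lesser": 0, "greater": 0, "superior": 5}, "arcane": {"lesser": 0, "greater": 0, "superior": 4}},
--         4: {"affinity": {"lesser": 0, "greater": 0, "superior": 6}, "arcane": {"lesser": 0, "greater": 0, "superior": 5}},
--         5: {"affinity": {"lesser": 0, "greater": 0, "superior": 7}, "arcane": {"lesser": 0, "greater": 0, "superior": 6}},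
--         6: {"affinity": {"lesser": 0, "greater": 0, "superior": 8}, "arcane": {"lesser": 0, "greater": 0, "superior": 7}}
--     }
-- }
--
-- def calculate_potions_needed_for_champion(rarity, start_rank, end_rank):
--     total_potions = {"lesser": 0, "greater": 0, "superior": 0}
--
--     for rank in range(start_rank, end_rank + 1):
--         costs = potion_costs[rarity][rank]
--         total_potions["lesser"] += costs["affinity"]["lesser"]
--         total_potions["greater"] += costs["affinity"]["greater"]
--         total_potions["superior"] += costs["affinity"]["superior"]
--
--     return total_potions
--
-- def calculate_total_potions(champions):
--     total_affinity_potions = {"S": {"lesser": 0, "greater": 0, "superior": 0},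
--                               "F": {"lesser": 0, "greater": 0, "superior": 0},
--                               "M": {"lesser": 0, "greater": 0, "superior": 0},
--                               "V": {"lesser": 0, "greater": 0, "superior": 0}}
--     total_arcane_potions = {"lesser": 0, "greater": 0, "superior": 0}
--
--     for champion in champions:
--         rarity, affinity, start_rank, end_rank = champion
--         potions_needed = calculate_potions_needed_for_champion(rarity, start_rank, end_rank)
--
--         # Add to the affinity-specific potions
--         total_affinity_potions[affinity]["lesser"] += potions_needed["lesser"]
--         total_affinity_potions[affinity]["greater"] += potions_needed["greater"]
--         total_affinity_potions[affinity]["superior"] += potions_needed["superior"]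
--
--         # Add the corresponding arcane potions
--         for rank in range(start_rank, end_rank + 1):
--             arcane_costs = potion_costs[rarity][rank]["arcane"]
--             total_arcane_potions["lesser"] += arcane_costs["lesser"]
--             total_arcane_potions["greater"] += arcane_costs["greater"]
--             total_arcane_potions["superior"] += arcane_costs["superior"]
--
--     return total_affinity_potions, total_arcane_potions
-- ===== SOURCE B (Python) =====
-- potion_costs = {
--     "U": {
--         1: {"affinity": {"lesser": 2, "greater": 0, "superior": 0}, "arcane": {"lesser": 2, "greater": 0, "superior": 0}},
--         2: {"affinity": {"lesser": 2, "greater": 0, "superior": 0}, "arcane": {"lesser": 2, "greater": 0, "superior": 0}},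
--         3: {"affinity": {"lesser": 3, "greater": 0, "superior": 0}, "arcane": {"lesser": 2, "greater": 0, "superior": 0}},
--         4: {"affinity": {"lesser": 3, "greater": 0, "superior": 0}, "arcane": {"lesser": 3, "greater": 0, "superior": 0}},
--         5: {"affinity": {"lesser": 5, "greater": 0, "superior": 0}, "arcane": {"lesser": 3, "greater": 0, "superior": 0}},
--         6: {"affinity": {"lesser": 5, "greater": 0, "superior": 0}, "arcane": {"lesser": 3, "greater": 0, "superior": 0}}
--     },
--     "R": {
--         1: {"affinity": {"lesser": 4, "greater": 0, "superior": 0}, "arcane": {"lesser": 2, "greater": 0, "superior": 0}},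
--         2: {"affinity": {"lesser": 6, "greater": 0, "superior": 0}, "arcane": {"lesser": 3, "greater": 0, "superior": 0}},
--         3: {"affinity": {"lesser": 0, "greater": 2, "superior": 0}, "arcane": {"lesser": 0, "greater": 1, "superior": 0}},
--         4: {"affinity": {"lesser": 0, "greater": 2, "superior": 0}, "arcane": {"lesser": 0, "greater": 2, "superior": 0}},
--         5: {"affinity": {"lesser": 0, "greater": 5, "superior": 0}, "arcane": {"lesser": 0, "greater": 3, "superior": 0}},
--         6: {"affinity": {"lesser": 0, "greater": 6, "superior": 0}, "arcane": {"lesser": 0, "greater": 4, "superior": 0}}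
--     },
--     "E": {
--         1: {"affinity": {"lesser": 0, "greater": 4, "superior": 0}, "arcane": {"lesser": 0, "greater": 3, "superior": 0}},
--         2: {"affinity": {"lesser": 0, "greater": 7, "superior": 0}, "arcane": {"lesser": 0, "greater": 5, "superior": 0}},
--         3: {"affinity": {"lesser": 0, "greater": 9, "superior": 0}, "arcane": {"lesser": 0, "greater": 7, "superior": 0}},
--         4: {"affinity": {"lesser": 0, "greater": 0, "superior": 3}, "arcane": {"lesser": 0, "greater": 0, "superior": 1}},
--         5: {"affinity": {"lesser": 0, "greater": 0, "superior": 3}, "arcane": {"lesser": 0, "greater": 0, "superior": 2}},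
--         6: {"affinity": {"lesser": 0, "greater": 0, "superior": 4}, "arcane": {"lesser": 0, "greater": 0, "superior": 2}}
--     },
--     "L": {
--         1: {"affinity": {"lesser": 0, "greater": 0, "superior": 1}, "arcane": {"lesser": 0, "greater": 5, "superior": 0}},
--         2: {"affinity": {"lesser": 0, "greater": 0, "superior": 2}, "arcane": {"lesser": 0, "greater": 0, "superior": 2}},
--         3: {"affinity": {"lesser": 0, "greater": 0, "superior": 3}, "arcane": {"lesser": 0, "greater": 0, "superior": 2}},
--         4: {"affinity": {"lesser": 0, "greater": 0, "superior": 4}, "arcane": {"lesser": 0, "greater": 0, "superior": 3}},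
--         5: {"affinity": {"lesser": 0, "greater": 0, "superior": 5}, "arcane": {"lesser": 0, "greater": 0, "superior": 4}},
--         6: {"affinity": {"lesser": 0, "greater": 0, "superior": 6}, "arcane": {"lesser": 0, "greater": 0, "superior": 5}}
--     },
--     "M": {
--         1: {"affinity": {"lesser": 0, "greater": 0, "superior": 3}, "arcane": {"lesser": 0, "greater": 0, "superior": 2}},
--         2: {"affinity": {"lesser": 0, "greater": 0, "superior": 4}, "arcane": {"lesser": 0, "greater": 0, "superior": 3}},
--         3: {"affinity": {"lesser": 0, "greater": 0, "superior": 5}, "arcane": {"lesser": 0, "greater": 0, "superior": 4}},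
--         4: {"affinity": {"lesser": 0, "greater": 0, "superior": 6}, "arcane": {"lesser": 0, "greater": 0, "superior": 5}},
--         5: {"affinity": {"lesser": 0, "greater": 0, "superior": 7}, "arcane": {"lesser": 0, "greater": 0, "superior": 6}},
--         6: {"affinity": {"lesser": 0, "greater": 0, "superior": 8}, "arcane": {"lesser": 0, "greater": 0, "superior": 7}}
--     }
-- }
--
-- # Prefix sums over ranks, built once from potion_costs:
-- # _cum[rarity][r] = (affinity (l,g,s), arcane (l,g,s)) summed over ranks 1..r; r=0 is all zeros.
-- def _build_cum():
--     cum = {}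
--     for rarity, ranks in potion_costs.items():
--         al = ag = asu = cl = cg = cs = 0
--         row = [((0, 0, 0), (0, 0, 0))]
--         for r in range(1, 7):
--             a = ranks[r]["affinity"]
--             c = ranks[r]["arcane"]
--             al += a["lesser"]; ag += a["greater"]; asu += a["superior"]
--             cl += c["lesser"]; cg += c["greater"]; cs += c["superior"]
--             row.append(((al, ag, asu), (cl, cg, cs)))
--         cum[rarity] = row
--     return cum
--
-- _cum = _build_cum()
--
-- def calculate_total_potions(champions):
--     aff_totals = {"S": [0, 0, 0], "F": [0, 0, 0], "M": [0, 0, 0], "V": [0, 0, 0]}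
--     arc_totals = [0, 0, 0]
--     for rarity, affinity, start_rank, end_rank in champions:
--         bucket = aff_totals[affinity]
--         if start_rank <= end_rank:
--             (ahl, ahg, ahs), (chl, chg, chs) = _cum[rarity][end_rank]
--             (all_, alg, als), (cll, clg, cls) = _cum[rarity][start_rank - 1]
--             bucket[0] += ahl - all_
--             bucket[1] += ahg - alg
--             bucket[2] += ahs - als
--             arc_totals[0] += chl - cll
--             arc_totals[1] += chg - clg
--             arc_totals[2] += chs - cls
--     keys = ("lesser", "greater", "superior")
--     return ({a: dict(zip(keys, t)) for a, t in aff_totals.items()},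
--             dict(zip(keys, arc_totals)))
-- ===== Notes on version B (the rewrite author's own statement) =====
-- stated objective: alternative
-- what changed: B precomputes per-rarity prefix sums of the potion-cost table once and replaces A's per-rank inner loops (run twice per champion) with a single prefix-sum subtraction per champion.
import Mathlib
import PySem

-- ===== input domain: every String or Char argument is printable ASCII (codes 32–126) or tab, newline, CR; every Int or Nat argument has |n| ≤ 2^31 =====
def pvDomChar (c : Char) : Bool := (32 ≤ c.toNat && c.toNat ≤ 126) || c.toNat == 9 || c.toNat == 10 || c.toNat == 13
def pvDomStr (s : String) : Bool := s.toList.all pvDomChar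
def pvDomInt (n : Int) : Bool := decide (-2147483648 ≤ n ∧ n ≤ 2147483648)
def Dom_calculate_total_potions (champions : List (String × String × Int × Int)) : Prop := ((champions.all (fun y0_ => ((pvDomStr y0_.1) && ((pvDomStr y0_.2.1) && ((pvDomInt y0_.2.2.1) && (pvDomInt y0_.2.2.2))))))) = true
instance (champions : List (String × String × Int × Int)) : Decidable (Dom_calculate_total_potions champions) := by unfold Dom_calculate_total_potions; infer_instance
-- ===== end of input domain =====

-- B replaces A's per-rank inner loops by per-rarity prefix sums (one subtraction per champion); return value only, A mutates nothing.

-- Shared static data: the module-level potion_costs table,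
-- rarity ↦ rank ↦ (affinity (lesser,greater,superior), arcane (lesser,greater,superior)).
def potionCosts : List (String × List (Int × ((Int × Int × Int) × (Int × Int × Int)))) :=
  [ ("U", [ (1, ((2,0,0),(2,0,0))), (2, ((2,0,0),(2,0,0))), (3, ((3,0,0),(2,0,0))),
            (4, ((3,0,0),(3,0,0))), (5, ((5,0,0),(3,0,0))), (6, ((5,0,0),(3,0,0))) ]),
    ("R", [ (1, ((4,0,0),(2,0,0))), (2, ((6,0,0),(3,0,0))), (3, ((0,2,0),(0,1,0))),
            (4, ((0,2,0),(0,2,0))), (5, ((0,5,0),(0,3,0))), (6, ((0,6,0),(0,4,0))) ]),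
    ("E", [ (1, ((0,4,0),(0,3,0))), (2, ((0,7,0),(0,5,0))), (3, ((0,9,0),(0,7,0))),
            (4, ((0,0,3),(0,0,1))), (5, ((0,0,3),(0,0,2))), (6, ((0,0,4),(0,0,2))) ]),
    ("L", [ (1, ((0,0,1),(0,5,0))), (2, ((0,0,2),(0,0,2))), (3, ((0,0,3),(0,0,2))),
            (4, ((0,0,4),(0,0,3))), (5, ((0,0,5),(0,0,4))), (6, ((0,0,6),(0,0,5))) ]),
    ("M", [ (1, ((0,0,3),(0,0,2))), (2, ((0,0,4),(0,0,3))), (3, ((0,0,5),(0,0,4))),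
            (4, ((0,0,6),(0,0,5))), (5, ((0,0,7),(0,0,6))), (6, ((0,0,8),(0,0,7))) ]) ]

-- potion_costs[rarity][rank]; the default is reachable only where Python raises KeyError (outside Pre_).
def costsGet (rar : String) (rank : Int) : (Int × Int × Int) × (Int × Int × Int) :=
  (((potionCosts.lookup rar).getD []).lookup rank).getD ((0,0,0), (0,0,0))

-- componentwise addition of a (lesser, greater, superior) triple
def padd (a b : Int × Int × Int) : Int × Int × Int := (a.1 + b.1, a.2.1 + b.2.1, a.2.2 + b.2.2)

-- accumulator: the four affinity buckets S, F, M, V and the arcane total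
def PState : Type := (Int × Int × Int) × (Int × Int × Int) × (Int × Int × Int) × (Int × Int × Int) × (Int × Int × Int)

def tripleOut (t : Int × Int × Int) : List (String × Int) :=
  [("lesser", t.1), ("greater", t.2.1), ("superior", t.2.2)]

-- ===== PORT A =====
-- helper calculate_potions_needed_for_champion
def potionsNeededA (rar : String) (s e : Int) : Int × Int × Int :=
  (PySem.List.pyRange s (e + 1) 1).foldl (fun t rank => padd t (costsGet rar rank).1) (0, 0, 0)

-- one iteration of A's champion loop (dict with the four fixed keys as four fields)
def stepA (st : PState) (c : String × String × Int × Int) : PState :=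
  let (rar, aff, s, e) := c
  let p := potionsNeededA rar s e
  let arc := (PySem.List.pyRange s (e + 1) 1).foldl (fun t rank => padd t (costsGet rar rank).2) st.2.2.2.2
  if aff = "S" then (padd st.1 p, st.2.1, st.2.2.1, st.2.2.2.1, arc)
  else if aff = "F" then (st.1, padd st.2.1 p, st.2.2.1, st.2.2.2.1, arc)
  else if aff = "M" then (st.1, st.2.1, padd st.2.2.1 p, st.2.2.2.1, arc)
  else if aff = "V" then (st.1, st.2.1, st.2.2.1, padd st.2.2.2.1 p, arc)
  else st  -- Python raises KeyError here (outside Pre_)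

def calculate_total_potions (champions : List (String × String × Int × Int)) : (List (String × List (String × Int))) × (List (String × Int)) :=
  let st := champions.foldl stepA ((0,0,0), (0,0,0), (0,0,0), (0,0,0), (0,0,0))
  ([("S", tripleOut st.1), ("F", tripleOut st.2.1), ("M", tripleOut st.2.2.1), ("V", tripleOut st.2.2.2.1)],
   tripleOut st.2.2.2.2)

-- ===== PORT B =====
-- _build_cum: per rarity, the list cum[0..6] of running (affinity, arcane) sums over ranks 1..r
def cumRow (ranks : List (Int × ((Int × Int × Int) × (Int × Int × Int)))) : List ((Int × Int × Int) × (Int × Int × Int)) :=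
  ((PySem.List.pyRange 1 7 1).foldl
    (fun (p : ((Int × Int × Int) × (Int × Int × Int)) × List ((Int × Int × Int) × (Int × Int × Int))) r =>
      let c := (ranks.lookup r).getD ((0,0,0), (0,0,0))
      let s := (padd p.1.1 c.1, padd p.1.2 c.2)
      (s, p.2 ++ [s]))
    (((0,0,0), (0,0,0)), [((0,0,0), (0,0,0))])).2

def cumTable : List (String × List ((Int × Int × Int) × (Int × Int × Int))) :=
  potionCosts.map (fun rr => (rr.1, cumRow rr.2))

def psub (a b : Int × Int × Int) : Int × Int × Int := (a.1 - b.1, a.2.1 - b.2.1, a.2.2 - b.2.2)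

-- one iteration of B's champion loop: prefix-sum difference, empty ranges contribute nothing
def stepB (st : PState) (c : String × String × Int × Int) : PState :=
  let (rar, aff, s, e) := c
  if s ≤ e then
    let row := (cumTable.lookup rar).getD []
    let hi := (PySem.List.pyGet? row e).getD ((0,0,0), (0,0,0))
    let lo := (PySem.List.pyGet? row (s - 1)).getD ((0,0,0), (0,0,0))
    let p := psub hi.1 lo.1
    let arc := padd st.2.2.2.2 (psub hi.2 lo.2)
    if aff = "S" then (padd st.1 p, st.2.1, st.2.2.1, st.2.2.2.1, arc)
    else if aff = "F" then (st.1, padd st.2.1 p, st.2.2.1, st.2.2.2.1, arc)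
    else if aff = "M" then (st.1, st.2.1, padd st.2.2.1 p, st.2.2.2.1, arc)
    else if aff = "V" then (st.1, st.2.1, st.2.2.1, padd st.2.2.2.1 p, arc)
    else st  -- Python raises KeyError here (outside Pre_)
  else st

def calculate_total_potions_alt (champions : List (String × String × Int × Int)) : (List (String × List (String × Int))) × (List (String × Int)) :=
  let st := champions.foldl stepB ((0,0,0), (0,0,0), (0,0,0), (0,0,0), (0,0,0))
  ([("S", tripleOut st.1), ("F", tripleOut st.2.1), ("M", tripleOut st.2.2.1), ("V", tripleOut st.2.2.2.1)],
   tripleOut st.2.2.2.2)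

-- ===== PRECONDITION & SPEC =====
-- Pre_ excludes exactly the inputs where A raises KeyError: an affinity outside {S,F,M,V}, or a
-- nonempty rank range with a rank outside 1..6 or an unknown rarity.
def Pre_calculate_total_potions (champions : List (String × String × Int × Int)) : Prop :=
  ∀ c ∈ champions, c.2.1 ∈ (["S", "F", "M", "V"] : List String) ∧
    (c.2.2.2 < c.2.2.1 ∨ (1 ≤ c.2.2.1 ∧ c.2.2.2 ≤ 6 ∧ c.1 ∈ (["U", "R", "E", "L", "M"] : List String)))
instance (champions : List (String × String × Int × Int)) : Decidable (Pre_calculate_total_potions champions) := by unfold Pre_calculate_total_potions; infer_instance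

def pvWitness_calculate_total_potions : (List (String × String × Int × Int)) :=
  [("U", "S", 1, 3), ("M", "V", 2, 6), ("R", "F", 5, 2)]

def Spec_calculate_total_potions (champions : List (String × String × Int × Int)) (out : (List (String × List (String × Int))) × (List (String × Int))) : Prop := out = calculate_total_potions_alt champions
instance (champions : List (String × String × Int × Int)) (out : (List (String × List (String × Int))) × (List (String × Int))) : Decidable (Spec_calculate_total_potions champions out) := by unfold Spec_calculate_total_potions; infer_instance

-- ===== CLAIM (what is proved, stated in full; the proofs are below) =====
def Claim_equal_calculate_total_potions : Prop := ∀ (champions : List (String × String × Int × Int)), Dom_calculate_total_potions champions → Pre_calculate_total_potions champions → Spec_calculate_total_potions champions (calculate_total_potions champions)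

-- ===== LEMMAS AND PROOFS =====

-- route a champion's (affinity delta, arcane delta) into the accumulator (proof helper)
def route (st : PState) (aff : String) (d : (Int × Int × Int) × (Int × Int × Int)) : PState :=
  if aff = "S" then (padd st.1 d.1, st.2.1, st.2.2.1, st.2.2.2.1, padd st.2.2.2.2 d.2)
  else if aff = "F" then (st.1, padd st.2.1 d.1, st.2.2.1, st.2.2.2.1, padd st.2.2.2.2 d.2)
  else if aff = "M" then (st.1, st.2.1, padd st.2.2.1 d.1, st.2.2.2.1, padd st.2.2.2.2 d.2)
  else if aff = "V" then (st.1, st.2.1, st.2.2.1, padd st.2.2.2.1 d.1, padd st.2.2.2.2 d.2)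
  else st

def deltaA (rar : String) (s e : Int) : (Int × Int × Int) × (Int × Int × Int) :=
  (potionsNeededA rar s e,
   (PySem.List.pyRange s (e + 1) 1).foldl (fun t rank => padd t (costsGet rar rank).2) (0, 0, 0))

def deltaB (rar : String) (s e : Int) : (Int × Int × Int) × (Int × Int × Int) :=
  if s ≤ e then
    let row := (cumTable.lookup rar).getD []
    let hi := (PySem.List.pyGet? row e).getD ((0,0,0), (0,0,0))
    let lo := (PySem.List.pyGet? row (s - 1)).getD ((0,0,0), (0,0,0))
    (psub hi.1 lo.1, psub hi.2 lo.2)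
  else ((0,0,0), (0,0,0))

theorem padd_assoc (a b c : Int × Int × Int) : padd (padd a b) c = padd a (padd b c) := by
  simp [padd]; omega

theorem padd_zero (a : Int × Int × Int) : padd a (0, 0, 0) = a := by
  simp [padd]

-- pull the starting accumulator out of a padd-fold
theorem foldl_padd_init (l : List Int) (f : Int → Int × Int × Int) (init : Int × Int × Int) :
    l.foldl (fun t r => padd t (f r)) init =
      padd init (l.foldl (fun t r => padd t (f r)) (0, 0, 0)) := by
  induction l generalizing init with
  | nil => simp [padd_zero]
  | cons x xs ih =>
    simp only [List.foldl_cons]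
    rw [ih (padd init (f x)), ih (padd (0, 0, 0) (f x)), padd_assoc]
    congr 1
    simp [padd]

theorem route_zero (st : PState) (aff : String) : route st aff ((0,0,0), (0,0,0)) = st := by
  unfold route; split_ifs <;> simp [padd_zero]

theorem stepA_route (st : PState) (rar aff : String) (s e : Int) :
    stepA st (rar, aff, s, e) = route st aff (deltaA rar s e) := by
  simp only [stepA, route, deltaA]
  rw [foldl_padd_init]

theorem stepB_route (st : PState) (rar aff : String) (s e : Int) :
    stepB st (rar, aff, s, e) = route st aff (deltaB rar s e) := by
  simp only [stepB, deltaB]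
  by_cases h : s ≤ e
  · simp only [if_pos h]; rfl
  · simp only [if_neg h]; exact (route_zero st aff).symm

-- the two step functions agree on every champion admitted by Pre_
theorem step_eq (st : PState) (c : String × String × Int × Int)
    (hc : c.2.2.2 < c.2.2.1 ∨ (1 ≤ c.2.2.1 ∧ c.2.2.2 ≤ 6 ∧ c.1 ∈ (["U", "R", "E", "L", "M"] : List String))) :
    stepA st c = stepB st c := by
  obtain ⟨rar, aff, s, e⟩ := c
  dsimp only at hc
  rw [stepA_route, stepB_route]
  by_cases hse : s ≤ e
  · obtain ⟨hs, he, hrar⟩ : 1 ≤ s ∧ e ≤ 6 ∧ rar ∈ (["U", "R", "E", "L", "M"] : List String) := by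
      rcases hc with h | h
      · omega
      · exact h
    have hs6 : s ≤ 6 := le_trans hse he
    have hd : deltaA rar s e = deltaB rar s e := by
      fin_cases hrar <;> interval_cases s <;> interval_cases e <;> decide
    rw [hd]
  · have h1 : deltaA rar s e = ((0,0,0), (0,0,0)) := by
      simp [deltaA, potionsNeededA, PySem.List.pyRange_one_eq_nil (by omega : e + 1 ≤ s)]
    have h2 : deltaB rar s e = ((0,0,0), (0,0,0)) := by
      simp [deltaB, hse]
    rw [h1, h2]

-- folds of the two step functions over champions inside Pre_ coincide
theorem foldl_step_eq (champions : List (String × String × Int × Int))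
    (hpre : Pre_calculate_total_potions champions) (st : PState) :
    champions.foldl stepA st = champions.foldl stepB st := by
  induction champions generalizing st with
  | nil => rfl
  | cons c cs ih =>
    have hc := hpre c (List.mem_cons_self ..)
    simp only [List.foldl_cons]
    rw [step_eq st c hc.2]
    exact ih (fun x hx => hpre x (List.mem_cons_of_mem _ hx)) _

-- ===== VERDICT (by name: the statement is the Claim_ definition above) =====
theorem calculate_total_potions_spec : Claim_equal_calculate_total_potions := by
  intro champions _ hpre
  unfold Spec_calculate_total_potions calculate_total_potions calculate_total_potions_alt
  rw [foldl_step_eq champions hpre]
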